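-- pv_equiv track=rewrite | github.com/cgoss/Moderation-ai | src/core/metrics.py | contains_profanity
-- ===== SOURCE A (Python) =====
-- from typing import Any, Dict, List, Optional, Callable
--
-- def contains_profanity(
--     text: str, profanity_list: Optional[List[str]] = None
-- ) -> bool:
--     """
--     Check if text contains profanity.
--
--     Args:
--         text: The text to analyze
--         profanity_list: List of profanity words (uses defaults if None)
--
--     Returns:
--         True if profanity detected
--     """
--     if profanity_list is None:
--         profanity_list = [
--             "shit",
--             "fuck",
--             "damn",
--             "ass",
--             "bitch",
--             "crap",
--             "bastard",
--             "idiot",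
--             "stupid",
--             "dumb",
--             "moron",
--         ]
--
--     text_lower = text.lower()
--     words = text_lower.split()
--
--     for word in words:
--         # Remove punctuation
--         clean_word = "".join(c for c in word if c.isalnum())
--         if clean_word in profanity_list:
--             return True
--
--     return False
-- ===== SOURCE B (Python) =====
-- def contains_profanity(text, profanity_list=None):
--     if profanity_list is None:
--         profanity_list = [
--             "shit", "fuck", "damn", "ass", "bitch", "crap",
--             "bastard", "idiot", "stupid", "dumb", "moron",
--         ]
--     prof = set(profanity_list)
--     # Single pass over the character stream: no split(), no per-word pass.
--     acc = []        # alnum characters of the current word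
--     in_word = False # current whitespace-run has seen a non-space char
--     for c in text.lower():
--         if c.isspace():
--             if in_word and "".join(acc) in prof:
--                 return True
--             acc = []
--             in_word = False
--         else:
--             in_word = True
--             if c.isalnum():
--                 acc.append(c)
--     return in_word and "".join(acc) in prof
-- ===== Notes on version B (the rewrite author's own statement) =====
-- stated objective: alternative
-- what changed: Replaces A's staged pipeline (split the text into words, then clean each word, then membership-test it) by a single character-level streaming pass: one loop over the lowered character stream maintaining an accumulator of the current word's alnum chars and an in-word flag, testing against a profanity set at each whitespace boundary with early exit.
import Mathlib
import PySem

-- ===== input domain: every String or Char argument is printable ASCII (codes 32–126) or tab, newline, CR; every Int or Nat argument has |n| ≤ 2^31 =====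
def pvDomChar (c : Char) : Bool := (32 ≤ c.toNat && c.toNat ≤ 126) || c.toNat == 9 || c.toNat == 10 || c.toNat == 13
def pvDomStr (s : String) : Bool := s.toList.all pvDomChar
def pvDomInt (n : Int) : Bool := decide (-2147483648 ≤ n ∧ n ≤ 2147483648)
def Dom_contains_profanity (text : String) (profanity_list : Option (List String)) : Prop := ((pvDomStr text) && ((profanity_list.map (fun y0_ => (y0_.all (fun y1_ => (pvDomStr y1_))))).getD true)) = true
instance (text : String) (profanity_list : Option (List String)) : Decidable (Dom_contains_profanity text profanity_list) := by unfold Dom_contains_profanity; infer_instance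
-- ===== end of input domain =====

-- B replaces A's staged split/clean/lookup pipeline by a single character-level streaming
-- pass (accumulator + in-word flag, early exit at word boundaries): a different traversal.

-- default profanity list (shared constant of the module)
def pvDefaultProfanity : List String :=
  ["shit", "fuck", "damn", "ass", "bitch", "crap",
   "bastard", "idiot", "stupid", "dumb", "moron"]

-- ===== PORT A =====
-- ''.join(c for c in word if c.isalnum())  (exact via PySem.Chars.isalnum)
def pvClean (w : String) : String := String.ofList (w.toList.filter PySem.Chars.isalnum)

def contains_profanity (text : String) (profanity_list : Option (List String)) : Bool :=
  let pl := profanity_list.getD pvDefaultProfanity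
  let words := PySem.Str.split₀ (PySem.Str.lower text)
  -- 'for word in words: … if clean_word in profanity_list: return True' / 'return False'
  words.any (fun word => pl.contains (pvClean word))

-- ===== PORT B =====
-- the streaming loop of Source B: acc = alnum chars of the current word, inw = in-word flag
def pvScan (prof : PySem.Set String) : List Char → List Char → Bool → Bool
  | [], acc, inw => inw && PySem.Set.contains prof (String.ofList acc)
  | c :: cs, acc, inw =>
    if PySem.Chars.isspace c then
      (if inw && PySem.Set.contains prof (String.ofList acc) then true
       else pvScan prof cs [] false)
    else pvScan prof cs (if PySem.Chars.isalnum c then acc ++ [c] else acc) true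

def contains_profanity_alt (text : String) (profanity_list : Option (List String)) : Bool :=
  let pl := profanity_list.getD pvDefaultProfanity
  let prof := PySem.Set.ofList pl
  pvScan prof (PySem.Str.lower text).toList [] false

-- ===== PRECONDITION & SPEC =====
def Spec_contains_profanity (text : String) (profanity_list : Option (List String)) (out : Bool) : Prop := out = contains_profanity_alt text profanity_list
instance (text : String) (profanity_list : Option (List String)) (out : Bool) : Decidable (Spec_contains_profanity text profanity_list out) := by unfold Spec_contains_profanity; infer_instance

-- ===== CLAIM =====
def Claim_equal_contains_profanity : Prop := ∀ (text : String) (profanity_list : Option (List String)), Dom_contains_profanity text profanity_list → Spec_contains_profanity text profanity_list (contains_profanity text profanity_list)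

-- ===== LEMMAS AND PROOFS =====

-- the streaming scan, started mid-word, decides "some word of split₀.go has a profane cleaning"
theorem pv_scan_go (pl : List String) :
    ∀ (cs cur : List Char) (accW : List (List Char)),
      (PySem.Chars.split₀.go cs cur accW).any
          (fun w => pl.contains (String.ofList (w.filter PySem.Chars.isalnum)))
        = (accW.any (fun w => pl.contains (String.ofList (w.filter PySem.Chars.isalnum)))
            || pvScan (PySem.Set.ofList pl) cs (cur.reverse.filter PySem.Chars.isalnum) (!cur.isEmpty)) := by
  intro cs
  induction cs with
  | nil =>
    intro cur accW
    by_cases h : cur = []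
    · subst h
      simp [PySem.Chars.split₀.go, pvScan, List.any_reverse]
    · simp [PySem.Chars.split₀.go, List.isEmpty_eq_false_iff.mpr h, pvScan,
        List.any_reverse, Bool.or_comm]
  | cons c cs ih =>
    intro cur accW
    by_cases hs : PySem.Chars.isspace c = true
    · by_cases h : cur = []
      · subst h
        simp only [PySem.Chars.split₀.go, hs, if_true, List.isEmpty_nil, pvScan]
        simpa using ih [] accW
      · have h' : cur.isEmpty = false := List.isEmpty_eq_false_iff.mpr h
        simp only [PySem.Chars.split₀.go, hs, if_true, h', if_false, Bool.false_eq_true]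
        rw [ih [] (cur.reverse :: accW)]
        simp [pvScan, hs, Bool.or_assoc]
        rw [Bool.or_left_comm]
    · simp only [PySem.Chars.split₀.go, hs, if_false, Bool.false_eq_true]
      rw [ih (c :: cur) accW]
      have hfilter : (c :: cur).reverse.filter PySem.Chars.isalnum
          = cur.reverse.filter PySem.Chars.isalnum ++ (if PySem.Chars.isalnum c then [c] else []) := by
        simp [List.filter_append, List.filter_cons]
      simp only [pvScan, hs, if_false, hfilter, Bool.false_eq_true, List.isEmpty_cons, Bool.not_false]
      split_ifs with ha <;> simp

-- ===== VERDICT =====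
theorem contains_profanity_spec : Claim_equal_contains_profanity := by
  intro text profanity_list _
  unfold Spec_contains_profanity contains_profanity contains_profanity_alt
  have hmap : ∀ (s : String),
      (PySem.Str.split₀ s).any (fun word => (profanity_list.getD pvDefaultProfanity).contains (pvClean word))
        = (PySem.Chars.split₀ s.toList).any
            (fun w => (profanity_list.getD pvDefaultProfanity).contains (String.ofList (w.filter PySem.Chars.isalnum))) := by
    intro s
    rw [← PySem.Str.split₀_map_toList, List.any_map]
    rfl
  rw [hmap]
  have := pv_scan_go (profanity_list.getD pvDefaultProfanity)
      (PySem.Str.lower text).toList [] []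
  simpa [PySem.Chars.split₀] using this
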